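-- pv_equiv track=rewrite | github.com/volcengine/verl | atropos/environments/intern_bootcamp/internbootcamp_lib/internbootcamp/bootcamp/dromandigits/dromandigits.py | calculate_answer
-- ===== SOURCE A (Python) =====
-- def calculate_answer(n):
--     if n == 1:
--         return 4
--     elif n <= 11:
--         values = {1, 5, 10, 50}
--         for _ in range(n-1):
--             next_gen = set()
--             for v in values:
--                 next_gen.update([v+1, v+5, v+10, v+50])
--             values = next_gen
--         return len(values)
--     else:
--         return 49 * (n - 11) + 292
-- ===== SOURCE B (Python) =====
-- def calculate_answer(n):
--     if n <= 1:
--         return 4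
--     elif n <= 11:
--         sums = set()
--         for b in range(n + 1):
--             for c in range(n + 1 - b):
--                 for d in range(n + 1 - b - c):
--                     a = n - b - c - d
--                     sums.add(a + 5 * b + 10 * c + 50 * d)
--         return len(sums)
--     else:
--         return 49 * (n - 11) + 292
-- ===== Notes on version B (the rewrite author's own statement) =====
-- stated objective: alternative
-- what changed: For 2<=n<=11 B enumerates the multiplicities (b,c,d) of digits 5/10/50 directly as compositions of n and collects each sum once, instead of A's iterated frontier expansion that rebuilds a growing set n-1 times; the degenerate n<=1 case and the n>11 closed form are kept.
import Mathlib
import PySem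

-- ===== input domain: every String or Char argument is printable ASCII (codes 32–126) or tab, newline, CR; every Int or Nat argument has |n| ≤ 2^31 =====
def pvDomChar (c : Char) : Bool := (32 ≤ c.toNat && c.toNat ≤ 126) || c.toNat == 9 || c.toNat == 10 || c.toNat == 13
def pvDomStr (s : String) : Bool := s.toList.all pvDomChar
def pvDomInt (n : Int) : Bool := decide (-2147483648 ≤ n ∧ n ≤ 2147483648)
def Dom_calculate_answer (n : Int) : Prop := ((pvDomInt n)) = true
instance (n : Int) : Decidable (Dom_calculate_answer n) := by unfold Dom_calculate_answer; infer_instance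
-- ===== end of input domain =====

-- B replaces A's layer-by-layer frontier growth by direct enumeration of digit multiplicities (compositions); objective: alternative algorithm, similar cost at these fixed sizes.


-- ===== PORT A =====
-- A: special-cases n == 1, grows the set of reachable sums layer by layer for n <= 11, closed form above.
def calculate_answer (n : Int) : Int :=
  if n = 1 then 4
  else if n ≤ 11 then
    let values : PySem.Set Int := PySem.Set.ofList [1, 5, 10, 50]
    let values := (PySem.List.pyRange 0 (n - 1) 1).foldl (fun values _ =>
      let next_gen : PySem.Set Int := PySem.Set.empty
      values.foldl (fun next_gen v =>
        PySem.Set.update next_gen [v + 1, v + 5, v + 10, v + 50]) next_gen) values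
    (PySem.Set.len values : Int)
  else 49 * (n - 11) + 292

-- ===== PORT B =====
-- B: for 2 <= n <= 11 enumerates digit multiplicities (compositions of n into counts of 1/5/10/50) instead of a BFS frontier.
def calculate_answer_alt (n : Int) : Int :=
  if n ≤ 1 then 4
  else if n ≤ 11 then
    let sums := (PySem.List.pyRange 0 (n + 1) 1).foldl (fun sums b =>
      (PySem.List.pyRange 0 (n + 1 - b) 1).foldl (fun sums c =>
        (PySem.List.pyRange 0 (n + 1 - b - c) 1).foldl (fun sums d =>
          let a := n - b - c - d
          PySem.Set.add sums (a + 5 * b + 10 * c + 50 * d)) sums) sums)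
      (PySem.Set.empty : PySem.Set Int)
    (PySem.Set.len sums : Int)
  else 49 * (n - 11) + 292

-- ===== PRECONDITION & SPEC =====
def Spec_calculate_answer (n : Int) (out : Int) : Prop := out = calculate_answer_alt n
instance (n : Int) (out : Int) : Decidable (Spec_calculate_answer n out) := by unfold Spec_calculate_answer; infer_instance

-- ===== CLAIM =====
def Claim_equal_calculate_answer : Prop := ∀ (n : Int), Dom_calculate_answer n → Spec_calculate_answer n (calculate_answer n)

-- ===== LEMMAS AND PROOFS =====

-- membership through a foldl whose step adds exactly the elements satisfying P b ·
theorem mem_foldl_step {α β : Type} (step : List α → β → List α) (P : β → α → Prop)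
    (h : ∀ s b x, x ∈ step s b ↔ x ∈ s ∨ P b x) :
    ∀ (l : List β) (init : List α) (x : α),
      x ∈ l.foldl step init ↔ x ∈ init ∨ ∃ b ∈ l, P b x := by
  intro l
  induction l with
  | nil => simp
  | cons b l ih =>
    intro init x
    simp only [List.foldl_cons, ih, h, List.mem_cons]
    constructor
    · rintro ((hx | hx) | ⟨b', hb', hx⟩)
      · exact Or.inl hx
      · exact Or.inr ⟨b, Or.inl rfl, hx⟩
      · exact Or.inr ⟨b', Or.inr hb', hx⟩
    · rintro (hx | ⟨b', (rfl | hb'), hx⟩)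
      · exact Or.inl (Or.inl hx)
      · exact Or.inl (Or.inr hx)
      · exact Or.inr ⟨b', hb', hx⟩

-- Nodup through a foldl whose step preserves Nodup
theorem nodup_foldl_step {α β : Type} (step : List α → β → List α)
    (h : ∀ (s : List α) (b : β), s.Nodup → (step s b).Nodup) :
    ∀ (l : List β) (init : List α), init.Nodup → (l.foldl step init).Nodup := by
  intro l
  induction l with
  | nil => intro init hi; simpa using hi
  | cons b l ih => intro init hi; exact ih _ (h init b hi)

-- the set of sums of (k+1) roman digits from {1,5,10,50}
def romanSums (k : Nat) (x : Int) : Prop :=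
  ∃ b c d : Int, 0 ≤ b ∧ 0 ≤ c ∧ 0 ≤ d ∧ b + c + d ≤ (k : Int) + 1 ∧
    x = (k : Int) + 1 + 4 * b + 9 * c + 49 * d

-- A's loop body
def aStep (values : PySem.Set Int) : PySem.Set Int :=
  values.foldl (fun next_gen v =>
    PySem.Set.update next_gen [v + 1, v + 5, v + 10, v + 50]) (PySem.Set.empty : PySem.Set Int)

theorem foldl_const_iterate {α β : Type} (F : α → α) :
    ∀ (l : List β) (init : α), l.foldl (fun s _ => F s) init = F^[l.length] init := by
  intro l
  induction l with
  | nil => intro init; rfl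
  | cons b l ih =>
    intro init
    simp only [List.foldl_cons, List.length_cons, ih, Function.iterate_succ_apply]

theorem mem_aStep (s : PySem.Set Int) (x : Int) :
    x ∈ aStep s ↔ ∃ v ∈ s, x = v + 1 ∨ x = v + 5 ∨ x = v + 10 ∨ x = v + 50 := by
  unfold aStep
  rw [mem_foldl_step _ (fun v x => x = v + 1 ∨ x = v + 5 ∨ x = v + 10 ∨ x = v + 50)]
  · simp [PySem.Set.empty]
  · intro s' v y
    simp only [PySem.Set.mem_update, List.mem_cons]
    tauto

theorem nodup_aStep (s : PySem.Set Int) : (aStep s).Nodup := by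
  unfold aStep
  exact nodup_foldl_step _ (fun s' v h => PySem.Set.nodup_update s' _ h) s _ List.nodup_nil

theorem aIter_mem (k : Nat) (x : Int) :
    x ∈ aStep^[k] (PySem.Set.ofList [1, 5, 10, 50]) ↔ romanSums k x := by
  induction k generalizing x with
  | zero =>
    simp only [Function.iterate_zero, id, PySem.Set.mem_ofList, romanSums]
    have hmem : x ∈ [(1 : Int), 5, 10, 50] ↔ x = 1 ∨ x = 5 ∨ x = 10 ∨ x = 50 := by
      simp [List.mem_cons]
    rw [hmem]
    constructor
    · rintro (rfl | rfl | rfl | rfl)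
      · exact ⟨0, 0, 0, by norm_num⟩
      · exact ⟨1, 0, 0, by norm_num⟩
      · exact ⟨0, 1, 0, by norm_num⟩
      · exact ⟨0, 0, 1, by norm_num⟩
    · rintro ⟨b, c, d, hb, hc, hd, hs, rfl⟩
      push_cast at hs ⊢
      have hcase : (b = 0 ∧ c = 0 ∧ d = 0) ∨ (b = 1 ∧ c = 0 ∧ d = 0) ∨
          (b = 0 ∧ c = 1 ∧ d = 0) ∨ (b = 0 ∧ c = 0 ∧ d = 1) := by omega
      rcases hcase with ⟨rfl, rfl, rfl⟩ | ⟨rfl, rfl, rfl⟩ | ⟨rfl, rfl, rfl⟩ | ⟨rfl, rfl, rfl⟩ <;> norm_num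
  | succ k ih =>
    rw [Function.iterate_succ_apply', mem_aStep]
    constructor
    · rintro ⟨v, hv, hx⟩
      rw [ih] at hv
      obtain ⟨b, c, d, hb, hc, hd, hs, rfl⟩ := hv
      unfold romanSums
      rcases hx with rfl | rfl | rfl | rfl
      · exact ⟨b, c, d, hb, hc, hd, by push_cast; omega, by omega⟩
      · exact ⟨b + 1, c, d, by omega, hc, hd, by push_cast; omega, by omega⟩
      · exact ⟨b, c + 1, d, hb, by omega, hd, by push_cast; omega, by omega⟩
      · exact ⟨b, c, d + 1, hb, hc, by omega, by push_cast; omega, by omega⟩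
    · rintro ⟨b, c, d, hb, hc, hd, hs, rfl⟩
      push_cast at hs
      by_cases h1 : b + c + d ≤ (k : Int) + 1
      · refine ⟨(k : Int) + 1 + 4 * b + 9 * c + 49 * d, ?_, ?_⟩
        · rw [ih]; exact ⟨b, c, d, hb, hc, hd, by omega, rfl⟩
        · left; omega
      · by_cases h2 : 0 < b
        · refine ⟨(k : Int) + 1 + 4 * (b - 1) + 9 * c + 49 * d, ?_, ?_⟩
          · rw [ih]; exact ⟨b - 1, c, d, by omega, hc, hd, by omega, rfl⟩
          · right; left; omega
        · by_cases h3 : 0 < c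
          · refine ⟨(k : Int) + 1 + 4 * b + 9 * (c - 1) + 49 * d, ?_, ?_⟩
            · rw [ih]; exact ⟨b, c - 1, d, hb, by omega, hd, by omega, rfl⟩
            · right; right; left; omega
          · refine ⟨(k : Int) + 1 + 4 * b + 9 * c + 49 * (d - 1), ?_, ?_⟩
            · rw [ih]; exact ⟨b, c, d - 1, hb, hc, by omega, by omega, rfl⟩
            · right; right; right; omega

theorem aIter_nodup (k : Nat) : (aStep^[k] (PySem.Set.ofList [1, 5, 10, 50])).Nodup := by
  cases k with
  | zero => exact PySem.Set.nodup_ofList _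
  | succ k => rw [Function.iterate_succ_apply']; exact nodup_aStep _

-- B's set for a given n
def bSet (n : Int) : PySem.Set Int :=
  (PySem.List.pyRange 0 (n + 1) 1).foldl (fun sums b =>
    (PySem.List.pyRange 0 (n + 1 - b) 1).foldl (fun sums c =>
      (PySem.List.pyRange 0 (n + 1 - b - c) 1).foldl (fun sums d =>
        let a := n - b - c - d
        PySem.Set.add sums (a + 5 * b + 10 * c + 50 * d)) sums) sums)
    (PySem.Set.empty : PySem.Set Int)

theorem mem_bSet (n : Int) (x : Int) :
    x ∈ bSet n ↔ ∃ b c d : Int, 0 ≤ b ∧ 0 ≤ c ∧ 0 ≤ d ∧ b + c + d ≤ n ∧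
      x = (n - b - c - d) + 5 * b + 10 * c + 50 * d := by
  unfold bSet
  rw [mem_foldl_step _ (fun b x => ∃ c d : Int, 0 ≤ c ∧ 0 ≤ d ∧ c + d ≤ n - b ∧
      x = (n - b - c - d) + 5 * b + 10 * c + 50 * d)]
  · simp only [PySem.Set.empty, List.not_mem_nil, false_or, PySem.List.mem_pyRange_one]
    constructor
    · rintro ⟨b, ⟨hb0, hb1⟩, c, d, hc, hd, hcd, rfl⟩
      exact ⟨b, c, d, hb0, hc, hd, by omega, rfl⟩
    · rintro ⟨b, c, d, hb, hc, hd, hs, rfl⟩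
      exact ⟨b, ⟨hb, by omega⟩, c, d, hc, hd, by omega, rfl⟩
  · intro s b y
    rw [mem_foldl_step _ (fun c y => ∃ d : Int, 0 ≤ d ∧ d ≤ n - b - c ∧
        y = (n - b - c - d) + 5 * b + 10 * c + 50 * d)]
    · simp only [PySem.List.mem_pyRange_one]
      constructor
      · rintro (hy | ⟨c, ⟨hc0, hc1⟩, d, hd0, hd1, rfl⟩)
        · exact Or.inl hy
        · exact Or.inr ⟨c, d, hc0, hd0, by omega, rfl⟩
      · rintro (hy | ⟨c, d, hc, hd, hcd, rfl⟩)
        · exact Or.inl hy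
        · exact Or.inr ⟨c, ⟨hc, by omega⟩, d, hd, by omega, rfl⟩
    · intro s' c y
      rw [mem_foldl_step _ (fun d y => y = (n - b - c - d) + 5 * b + 10 * c + 50 * d)]
      · simp only [PySem.List.mem_pyRange_one]
        constructor
        · rintro (hy | ⟨d, ⟨hd0, hd1⟩, rfl⟩)
          · exact Or.inl hy
          · exact Or.inr ⟨d, hd0, by omega, rfl⟩
        · rintro (hy | ⟨d, hd0, hd1, rfl⟩)
          · exact Or.inl hy
          · exact Or.inr ⟨d, ⟨hd0, by omega⟩, rfl⟩
      · intro s'' d y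
        exact PySem.Set.mem_add s'' _ y

theorem nodup_bSet (n : Int) : (bSet n).Nodup := by
  unfold bSet
  refine nodup_foldl_step _ ?_ _ _ List.nodup_nil
  intro s b hs
  refine nodup_foldl_step _ ?_ _ _ hs
  intro s' c hs'
  refine nodup_foldl_step _ ?_ _ _ hs'
  intro s'' d hs''
  exact PySem.Set.nodup_add s'' _ hs''

theorem sets_agree (n : Int) (h2 : 2 ≤ n) :
    (aStep^[(n - 1).toNat] (PySem.Set.ofList [1, 5, 10, 50])).length = (bSet n).length := by
  have hperm : (aStep^[(n - 1).toNat] (PySem.Set.ofList [1, 5, 10, 50])).Perm (bSet n) := by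
    rw [List.perm_ext_iff_of_nodup (aIter_nodup _) (nodup_bSet n)]
    intro x
    rw [aIter_mem, mem_bSet, romanSums]
    have hk : ((n - 1).toNat : Int) = n - 1 := by omega
    constructor
    · rintro ⟨b, c, d, hb, hc, hd, hs, rfl⟩
      rw [hk] at hs ⊢
      exact ⟨b, c, d, hb, hc, hd, by omega, by ring⟩
    · rintro ⟨b, c, d, hb, hc, hd, hs, rfl⟩
      rw [hk]
      exact ⟨b, c, d, hb, hc, hd, by omega, by ring⟩
  exact hperm.length_eq

theorem agree_small (n : Int) (h2 : 2 ≤ n) (h11 : n ≤ 11) :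
    calculate_answer n = calculate_answer_alt n := by
  have hA : calculate_answer n =
      ((aStep^[(n - 1).toNat] (PySem.Set.ofList [1, 5, 10, 50])).length : Int) := by
    simp only [calculate_answer, if_neg (by omega : ¬ n = 1), if_pos h11]
    show (((PySem.List.pyRange 0 (n - 1) 1).foldl (fun values (_ : Int) => aStep values)
        (PySem.Set.ofList [1, 5, 10, 50])).length : Int) = _
    rw [foldl_const_iterate aStep, PySem.List.length_pyRange_one]
    norm_num
  have hB : calculate_answer_alt n = ((bSet n).length : Int) := by
    simp only [calculate_answer_alt, if_neg (by omega : ¬ n ≤ 1), if_pos h11]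
    rfl
  rw [hA, hB, sets_agree n h2]

-- ===== VERDICT =====
theorem calculate_answer_spec : Claim_equal_calculate_answer := by
  intro n _
  unfold Spec_calculate_answer
  by_cases h1 : n ≤ 1
  · by_cases h : n = 1
    · subst h; decide
    · simp only [calculate_answer, calculate_answer_alt,
        if_neg h, if_pos (by omega : n ≤ 11), if_pos h1,
        PySem.List.pyRange_one_eq_nil (by omega : n - 1 ≤ 0), List.foldl_nil]
      decide
  · by_cases h11 : n ≤ 11
    · exact agree_small n (by omega) h11
    · simp only [calculate_answer, calculate_answer_alt,
        if_neg (by omega : ¬ n = 1), if_neg h11, if_neg h1]
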